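-- pv_equiv track=rewrite | github.com/wickednull/KTOX_Pi | payloads/utilities/notification_center.py | _merge_notifications
-- ===== SOURCE A (Python) =====
-- def _merge_notifications(base, extra):
--     """Merge two notification lists, deduplicate by timestamp+message, newest first."""
--     seen = set()
--     merged = []
--     for item in base + extra:
--         key = (item.get("timestamp", ""), item.get("message", ""))
--         if key not in seen:
--             seen.add(key)
--             merged.append(item)
--     merged.sort(key=lambda x: x.get("timestamp", ""), reverse=True)
--     return merged
-- ===== SOURCE B (Python) =====
-- def _merge_notifications(base, extra):
--     """Merge two notification lists, deduplicate by timestamp+message, newest first."""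
--     merged = []
--     for item in base + extra:
--         key = (item.get("timestamp", ""), item.get("message", ""))
--         if any((m.get("timestamp", ""), m.get("message", "")) == key for m in merged):
--             continue
--         i = 0
--         while i < len(merged) and merged[i].get("timestamp", "") >= item.get("timestamp", ""):
--             i += 1
--         merged.insert(i, item)
--     return merged
-- ===== Notes on version B (the rewrite author's own statement) =====
-- stated objective: alternative
-- what changed: A hash-dedupes with a seen-set and then calls the library stable sort; B uses no set and no sort call: one incremental pass keeps a sorted-unique accumulator, skipping items whose (timestamp,message) key already occurs in it and otherwise inserting each item at its descending-timestamp position (after all equal timestamps, so stable ties are preserved).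
import Mathlib
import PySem

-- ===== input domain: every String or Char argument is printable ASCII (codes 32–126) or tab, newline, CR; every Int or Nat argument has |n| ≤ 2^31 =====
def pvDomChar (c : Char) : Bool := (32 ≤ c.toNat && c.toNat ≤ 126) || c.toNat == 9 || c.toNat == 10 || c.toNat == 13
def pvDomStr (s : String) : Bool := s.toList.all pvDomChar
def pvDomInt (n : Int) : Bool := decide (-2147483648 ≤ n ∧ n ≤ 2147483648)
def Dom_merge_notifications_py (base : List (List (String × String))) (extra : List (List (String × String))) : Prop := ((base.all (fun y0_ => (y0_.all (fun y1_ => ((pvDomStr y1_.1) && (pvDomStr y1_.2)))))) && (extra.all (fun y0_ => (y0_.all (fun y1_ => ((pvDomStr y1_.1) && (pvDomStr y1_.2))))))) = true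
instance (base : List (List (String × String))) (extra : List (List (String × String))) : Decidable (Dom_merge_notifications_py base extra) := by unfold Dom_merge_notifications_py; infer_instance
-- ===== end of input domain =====

-- B replaces A's seen-set dedup + library stable sort by one incremental pass inserting each new-keyed item into a sorted-unique accumulator; alternative decomposition (no set, no sort call), quadratic instead of n log n.


-- shared helper: item.get("timestamp", "") and the dedup key (item.get("timestamp",""), item.get("message",""))
def pvTs (item : List (String × String)) : String := PySem.Dict.getD ⟨item⟩ "timestamp" ""
def pvKey (item : List (String × String)) : String × String := (pvTs item, PySem.Dict.getD ⟨item⟩ "message" "")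

-- ===== PORT A =====
-- seen-set dedup loop over base + extra, then merged.sort(key=…, reverse=True)
def merge_notifications_py (base : List (List (String × String))) (extra : List (List (String × String))) : List (List (String × String)) :=
  let merged :=
    ((base ++ extra).foldl
      (fun (st : PySem.Set (String × String) × List (List (String × String))) item =>
        let key := pvKey item
        if PySem.Set.contains st.1 key then st
        else (PySem.Set.add st.1 key, st.2 ++ [item]))
      (PySem.Set.empty, [])).2
  PySem.List.sorted merged pvTs true

-- ===== PORT B =====
-- single pass: skip items whose key already occurs in the accumulator, else insert at the
-- descending-timestamp position (after every element with ts ≥ new ts — Source B's while loop = insertBy)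
def merge_notifications_py_alt (base : List (List (String × String))) (extra : List (List (String × String))) : List (List (String × String)) :=
  (base ++ extra).foldl
    (fun (merged : List (List (String × String))) item =>
      if merged.any (fun m => pvKey m == pvKey item) then merged
      else PySem.List.insertBy (fun a b => decide (pvTs b < pvTs a)) item merged)
    []

-- ===== PRECONDITION & SPEC =====
def Spec_merge_notifications_py (base : List (List (String × String))) (extra : List (List (String × String))) (out : List (List (String × String))) : Prop := out = merge_notifications_py_alt base extra
instance (base : List (List (String × String))) (extra : List (List (String × String))) (out : List (List (String × String))) : Decidable (Spec_merge_notifications_py base extra out) := by unfold Spec_merge_notifications_py; infer_instance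

-- ===== CLAIM (what is proved, stated in full; the proofs are below) =====
def Claim_equal_merge_notifications_py : Prop := ∀ (base : List (List (String × String))) (extra : List (List (String × String))), Dom_merge_notifications_py base extra → Spec_merge_notifications_py base extra (merge_notifications_py base extra)

-- ===== LEMMAS AND PROOFS =====

-- first-occurrence dedup by pvKey, with an explicit seen list (characterises A's dedup loop)
def pvDD (seen : List (String × String)) : List (List (String × String)) → List (List (String × String))
  | [] => []
  | x :: t => if pvKey x ∈ seen then pvDD seen t else x :: pvDD (seen ++ [pvKey x]) t

theorem pvDD_cons (ss : List (String × String)) (z : List (String × String))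
    (l : List (List (String × String))) :
    pvDD ss (z :: l) = if pvKey z ∈ ss then pvDD ss l else z :: pvDD (ss ++ [pvKey z]) l := rfl

theorem pvDD_snoc (l : List (List (String × String))) (x : List (String × String))
    (s : List (String × String)) :
    pvDD s (l ++ [x]) =
      if pvKey x ∈ s ∨ pvKey x ∈ l.map pvKey then pvDD s l else pvDD s l ++ [x] := by
  induction l generalizing s with
  | nil => by_cases h : pvKey x ∈ s <;> simp [pvDD, h]
  | cons y t ih =>
    rw [List.cons_append, pvDD_cons, pvDD_cons]
    by_cases hy : pvKey y ∈ s
    · rw [if_pos hy, if_pos hy, ih]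
      by_cases hC : pvKey x ∈ s ∨ pvKey x ∈ (y :: t).map pvKey
      · have hC' : pvKey x ∈ s ∨ pvKey x ∈ t.map pvKey := by
          rcases hC with h | h
          · exact Or.inl h
          · rcases (by simpa using h : pvKey x = pvKey y ∨ pvKey x ∈ t.map pvKey) with h | h
            · exact Or.inl (h ▸ hy)
            · exact Or.inr h
        rw [if_pos hC', if_pos hC]
      · have hC' : ¬(pvKey x ∈ s ∨ pvKey x ∈ t.map pvKey) := by
          rintro (h | h)
          · exact hC (Or.inl h)
          · exact hC (Or.inr (by simp [h]))
        rw [if_neg hC', if_neg hC]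
    · rw [if_neg hy, if_neg hy, ih]
      have hCiff : (pvKey x ∈ s ++ [pvKey y] ∨ pvKey x ∈ t.map pvKey) ↔
          (pvKey x ∈ s ∨ pvKey x ∈ (y :: t).map pvKey) := by
        simp only [List.mem_append, List.mem_cons, List.not_mem_nil, or_false, List.map_cons]
        tauto
      by_cases hC : pvKey x ∈ s ∨ pvKey x ∈ (y :: t).map pvKey
      · rw [if_pos (hCiff.mpr hC), if_pos hC]
      · rw [if_neg (fun hh => hC (hCiff.mp hh)), if_neg hC, List.cons_append]

-- the keys surviving dedup: exactly the input keys not already seen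
theorem mem_map_pvDD (c : String × String) (l : List (List (String × String)))
    (s : List (String × String)) :
    c ∈ (pvDD s l).map pvKey ↔ (c ∉ s ∧ c ∈ l.map pvKey) := by
  induction l generalizing s with
  | nil => simp [pvDD]
  | cons x t ih =>
    rw [pvDD_cons]
    by_cases hx : pvKey x ∈ s
    · rw [if_pos hx, ih]
      constructor
      · rintro ⟨h1, h2⟩; exact ⟨h1, by simp [h2]⟩
      · rintro ⟨h1, h2⟩
        rcases (by simpa using h2 : c = pvKey x ∨ c ∈ t.map pvKey) with rfl | h2
        · exact absurd hx h1
        · exact ⟨h1, h2⟩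
    · rw [if_neg hx]
      by_cases hc : c = pvKey x
      · subst hc; simp [hx]
      · simp only [List.map_cons, List.mem_cons, ih, List.mem_append]
        tauto

-- bridge for A's loop: the seen-set fold is pvDD
theorem foldA_eq_pvDD (l : List (List (String × String))) (s : PySem.Set (String × String))
    (acc : List (List (String × String))) :
    (l.foldl
      (fun (st : PySem.Set (String × String) × List (List (String × String))) item =>
        let key := pvKey item
        if PySem.Set.contains st.1 key then st
        else (PySem.Set.add st.1 key, st.2 ++ [item])) (s, acc)).2 = acc ++ pvDD s l := by
  induction l generalizing s acc with
  | nil => simp [pvDD]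
  | cons x t ih =>
    by_cases h : pvKey x ∈ s
    · have hc : PySem.Set.contains s (pvKey x) = true := (PySem.Set.contains_iff s _).mpr h
      rw [List.foldl_cons]
      simp only [hc, if_true]
      rw [ih, pvDD_cons, if_pos h]
    · have hc : PySem.Set.contains s (pvKey x) = false := by
        by_contra hne
        exact h ((PySem.Set.contains_iff s _).mp (by simpa using hne))
      have hadd : PySem.Set.add s (pvKey x) = s ++ [pvKey x] := by
        rw [PySem.Set.add, if_neg (by rw [hc]; simp)]
      rw [List.foldl_cons]
      simp only [hc, Bool.false_eq_true, if_false]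
      rw [hadd, ih, pvDD_cons, if_neg h, List.append_assoc, List.singleton_append]

-- B's accumulator after consuming l is exactly sorted(pvDD [] l) newest-first
theorem foldB_eq_sorted_pvDD (l : List (List (String × String))) :
    l.foldl
      (fun (merged : List (List (String × String))) item =>
        if merged.any (fun m => pvKey m == pvKey item) then merged
        else PySem.List.insertBy (fun a b => decide (pvTs b < pvTs a)) item merged)
      [] = PySem.List.sorted (pvDD [] l) pvTs true := by
  induction l using List.reverseRecOn with
  | nil => rfl
  | append_singleton l x ih =>
    have hsnoc : ∀ (m : List (List (String × String))),
        PySem.List.sorted (m ++ [x]) pvTs true =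
          PySem.List.insertBy (fun a b => decide (pvTs b < pvTs a)) x (PySem.List.sorted m pvTs true) := by
      intro m
      rw [PySem.List.sorted_rev_eq_foldl_insertBy, PySem.List.sorted_rev_eq_foldl_insertBy,
        List.foldl_append]
      rfl
    rw [List.foldl_append, List.foldl_cons, List.foldl_nil, ih]
    have hmem : (PySem.List.sorted (pvDD [] l) pvTs true).any (fun m => pvKey m == pvKey x) = true ↔
        pvKey x ∈ l.map pvKey := by
      rw [List.any_eq_true]
      constructor
      · rintro ⟨m, hm, hbeq⟩
        have hmk : pvKey x ∈ (pvDD [] l).map pvKey :=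
          List.mem_map.mpr ⟨m, (PySem.List.mem_sorted _ _ _ _).mp hm, eq_of_beq hbeq⟩
        exact ((mem_map_pvDD _ _ _).mp hmk).2
      · intro h
        have hmk : pvKey x ∈ (pvDD [] l).map pvKey :=
          (mem_map_pvDD _ _ _).mpr ⟨by simp, h⟩
        rcases List.mem_map.mp hmk with ⟨m, hm, hk⟩
        exact ⟨m, (PySem.List.mem_sorted _ _ _ _).mpr hm, by simp [hk]⟩
    by_cases hc : pvKey x ∈ l.map pvKey
    · rw [if_pos (hmem.mpr hc), pvDD_snoc, if_pos (Or.inr hc)]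
    · rw [if_neg (fun hh => hc (hmem.mp hh)), pvDD_snoc,
        if_neg (by simp [hc]), hsnoc]

-- ===== VERDICT (by name: the statement is the Claim_ definition above) =====
theorem merge_notifications_py_spec : Claim_equal_merge_notifications_py := by
  intro base extra _
  unfold Spec_merge_notifications_py merge_notifications_py merge_notifications_py_alt
  rw [foldA_eq_pvDD, foldB_eq_sorted_pvDD]
  simp [PySem.Set.empty]
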